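-- pv_equiv track=rewrite | github.com/SawhneySatvik/neetcode-submissions-mtd9ukzt | Data Structures & Algorithms/valid-sudoku/submission-0.py | isValidCol
-- ===== SOURCE A (Python) =====
-- from typing import List
--
-- def isValidCol(col: List[str]) -> bool:
--     hash_table = {}
--     for ele in col:
--         hash_table[ele] = hash_table.get(ele, 0) + 1
--
--     for key, val in hash_table.items():
--         if key != "." and val > 1:
--             return False
--     return True
-- ===== SOURCE B (Python) =====
-- def isValidCol(col):
--     vals = sorted(v for v in col if v != ".")
--     for a, b in zip(vals, vals[1:]):
--         if a == b:
--             return False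
--     return True
-- ===== Notes on version B (the rewrite author's own statement) =====
-- stated objective: alternative
-- what changed: Replaced A's hash-based frequency counting (build a dict of counts, then scan its items) with a sort-based algorithm: filter out dots, sort the remaining values, and scan adjacent pairs of the sorted list for an equal neighbour.
import Mathlib
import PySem

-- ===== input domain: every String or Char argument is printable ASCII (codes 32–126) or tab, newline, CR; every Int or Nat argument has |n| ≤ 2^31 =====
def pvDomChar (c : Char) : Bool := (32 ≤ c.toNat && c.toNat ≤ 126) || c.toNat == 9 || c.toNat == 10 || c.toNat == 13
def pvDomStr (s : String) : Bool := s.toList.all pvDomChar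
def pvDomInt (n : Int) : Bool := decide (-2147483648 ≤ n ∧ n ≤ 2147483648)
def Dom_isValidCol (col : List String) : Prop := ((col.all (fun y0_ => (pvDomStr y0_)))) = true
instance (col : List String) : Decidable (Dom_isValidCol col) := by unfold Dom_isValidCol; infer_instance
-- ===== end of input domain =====

-- B replaces A's hash-based frequency count with sort-then-adjacent-scan: filter out
-- dots, sort, and look for an equal adjacent pair (objective: alternative algorithm).

-- ===== PORT A =====
-- second loop of A: scan the dict items, return False at the first key ≠ "." with val > 1
def isValidColScan : List (String × Int) → Bool
  | [] => true
  | (k, v) :: rest => if k ≠ "." ∧ v > 1 then false else isValidColScan rest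

def isValidCol (col : List String) : Bool :=
  let hash_table : PySem.Dict String Int :=
    col.foldl (fun d ele => d.insert ele (d.getD ele 0 + 1)) PySem.Dict.empty
  isValidColScan hash_table.items

-- ===== PORT B =====
-- B's loop `for a, b in zip(vals, vals[1:])`: scan adjacent pairs of the sorted list
def isValidColAdj : List String → Bool
  | a :: b :: rest => if a = b then false else isValidColAdj (b :: rest)
  | _ => true

def isValidCol_alt (col : List String) : Bool :=
  let vals := PySem.List.sorted (col.filter (fun v => decide (v ≠ "."))) (fun x => x) false
  isValidColAdj vals

-- ===== PRECONDITION & SPEC =====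
def Spec_isValidCol (col : List String) (out : Bool) : Prop := out = isValidCol_alt col
instance (col : List String) (out : Bool) : Decidable (Spec_isValidCol col out) := by unfold Spec_isValidCol; infer_instance

-- ===== CLAIM (what is proved, stated in full; the proofs are below) =====
def Claim_equal_isValidCol : Prop := ∀ (col : List String), Dom_isValidCol col → Spec_isValidCol col (isValidCol col)

-- ===== LEMMAS AND PROOFS =====

theorem isValidColScan_eq_true_iff (l : List (String × Int)) :
    isValidColScan l = true ↔ ∀ p ∈ l, ¬ (p.1 ≠ "." ∧ p.2 > 1) := by
  induction l with
  | nil => simp [isValidColScan]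
  | cons p rest ih =>
    obtain ⟨k, v⟩ := p
    by_cases h : k ≠ "." ∧ v > 1 <;> simp [isValidColScan, h, ih]
    push Not at h
    exact fun _ hk => h hk

theorem isValidCol_eq_true_iff (col : List String) :
    isValidCol col = true ↔ ∀ x, x ≠ "." → col.count x ≤ 1 := by
  unfold isValidCol
  rw [PySem.Dict.foldl_insert_getD_add_one_eq_counter, isValidColScan_eq_true_iff]
  simp only [PySem.Dict.items_counter, List.mem_map]
  constructor
  · intro h x hx
    by_cases hm : x ∈ col
    · have := h (x, (col.count x : Int)) ⟨x, by simp [PySem.Set.mem_ofList, hm]⟩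
      simp [hx] at this
      omega
    · simp [List.count_eq_zero_of_not_mem hm]
  · rintro h p ⟨k, hk, rfl⟩
    simp only [PySem.Set.mem_ofList] at hk
    by_cases hd : k = "."
    · simp [hd]
    · have := h k hd
      simp [hd]
      omega

theorem isValidColAdj_eq_true_iff (l : List String) :
    isValidColAdj l = true ↔ l.IsChain (· ≠ ·) := by
  induction l with
  | nil => simp [isValidColAdj]
  | cons a rest ih =>
    cases rest with
    | nil => simp [isValidColAdj]
    | cons b t =>
      by_cases h : a = b <;>
        simp [isValidColAdj, h, List.isChain_cons_cons, ih]

theorem sorted_adj_iff_nodup (l : List String) (hs : l.Pairwise (· ≤ ·)) :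
    l.IsChain (· ≠ ·) ↔ l.Nodup := by
  constructor
  · intro hc
    have hlt : l.IsChain (· < ·) := by
      have hle : l.IsChain (· ≤ ·) := hs.isChain
      clear hs
      revert hle hc
      induction l with
      | nil => intro _ _; simp
      | cons a rest ih =>
        cases rest with
        | nil => intro _ _; simp
        | cons b t =>
          intro hc hle
          rw [List.isChain_cons_cons] at hc hle ⊢
          exact ⟨lt_of_le_of_ne hle.1 hc.1, ih hc.2 hle.2⟩
    exact (List.isChain_iff_pairwise.mp hlt).imp ne_of_lt
  · intro hn
    exact hn.isChain

theorem isValidCol_alt_eq_true_iff (col : List String) :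
    isValidCol_alt col = true ↔ ∀ x, x ≠ "." → col.count x ≤ 1 := by
  unfold isValidCol_alt
  rw [isValidColAdj_eq_true_iff,
      sorted_adj_iff_nodup _ (by simpa using PySem.List.sorted_pairwise (col.filter (fun v => decide (v ≠ "."))) (fun x => x)),
      List.nodup_iff_count_le_one]
  constructor
  · intro h x hx
    have := h x
    rwa [(PySem.List.sorted_perm ..).count_eq _, List.count_filter (by simpa using hx)] at this
  · intro h x
    rw [(PySem.List.sorted_perm ..).count_eq _]
    by_cases hx : x = "."
    · have : List.count x (List.filter (fun v => decide (v ≠ ".")) col) = 0 := by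
        apply List.count_eq_zero_of_not_mem
        simp [hx]
      omega
    · rw [List.count_filter (by simpa using hx)]
      exact h x hx

-- ===== VERDICT (by name: the statement is the Claim_ definition above) =====
theorem isValidCol_spec : Claim_equal_isValidCol := by
  intro col _
  unfold Spec_isValidCol
  have := (isValidCol_eq_true_iff col).trans (isValidCol_alt_eq_true_iff col).symm
  cases h1 : isValidCol col <;> cases h2 : isValidCol_alt col <;> simp_all
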